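-- pv_equiv track=rewrite | github.com/AbhiSaphire/Competitive-Programming-Solutions | Coding Club India/Interview Questions/ValidPairSum.py | findNumOfPair
-- ===== SOURCE A (Python) =====
-- from bisect import bisect_left
--
-- def findNumOfPair(array, n):
--     array.sort()
--     count = 0
--     for i in range(n):
--         if array[i] <= 0:
--             continue
--         j = bisect_left(array, -array[i]+1)
--         count += i - j
--
--     return count
-- ===== SOURCE B (Python) =====
-- def findNumOfPair(array, n):
--     # Two-pointer scan from both ends instead of a bisect per element.
--     # Sorts array in place, like A.
--     array.sort()
--     count = 0
--     l, r = 0, n - 1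
--     while l < r:
--         if array[l] + array[r] > 0:
--             count += r - l
--             r -= 1
--         else:
--             l += 1
--     return count
-- ===== Notes on version B (the rewrite author's own statement) =====
-- stated objective: alternative
-- what changed: replaces the per-element binary search (bisect_left inside the loop) by a single opposing-ends two-pointer scan over the sorted array
import Mathlib
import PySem

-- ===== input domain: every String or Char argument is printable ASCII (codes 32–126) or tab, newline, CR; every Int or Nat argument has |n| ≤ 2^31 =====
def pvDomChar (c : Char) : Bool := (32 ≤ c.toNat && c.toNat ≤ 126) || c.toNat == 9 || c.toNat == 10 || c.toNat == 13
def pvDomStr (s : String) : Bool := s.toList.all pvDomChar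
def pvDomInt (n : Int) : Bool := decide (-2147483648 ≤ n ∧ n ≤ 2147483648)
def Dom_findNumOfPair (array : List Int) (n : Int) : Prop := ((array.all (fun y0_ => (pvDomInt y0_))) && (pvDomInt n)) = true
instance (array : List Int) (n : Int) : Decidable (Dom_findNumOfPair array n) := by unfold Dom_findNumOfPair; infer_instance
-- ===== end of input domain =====

-- B replaces A's per-element bisect_left by a single two-pointer scan from both ends of the
-- sorted array (alternative decomposition). Both Pythons sort `array` in place (same mutation);
-- the equivalence proved here is about the return value.

-- ===== PORT A =====
def findNumOfPair (array : List Int) (n : Int) : Int :=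
  let s := PySem.List.sorted array (fun x => x) false   -- array.sort()
  (PySem.List.pyRange 0 n 1).foldl (fun count i =>
    match PySem.List.pyGet? s i with
    | none => count                         -- IndexError in Python; excluded by Pre_
    | some ai =>
      if ai ≤ 0 then count
      else count + i - (PySem.List.bisectLeft s (-ai + 1) : Int)) 0

-- ===== PORT B =====
-- while l < r: …  — fuel is exactly r - l, which decreases by 1 each iteration
def twoPtrLoop (s : List Int) : Nat → Int → Int → Int → Int
  | 0, _, _, count => count
  | fuel+1, l, r, count =>
    match PySem.List.pyGet? s l, PySem.List.pyGet? s r with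
    | some al, some ar =>
      if 0 < al + ar then twoPtrLoop s fuel l (r - 1) (count + (r - l))
      else twoPtrLoop s fuel (l + 1) r count
    | _, _ => count                         -- IndexError in Python; excluded by Pre_

def findNumOfPair_alt (array : List Int) (n : Int) : Int :=
  let s := PySem.List.sorted array (fun x => x) false   -- array.sort()
  twoPtrLoop s (n - 1).toNat 0 (n - 1) 0

-- ===== PRECONDITION & SPEC =====
-- A raises IndexError iff some i in range(n) is out of range, i.e. iff n > len(array).
def Pre_findNumOfPair (array : List Int) (n : Int) : Prop := n ≤ (array.length : Int)
instance (array : List Int) (n : Int) : Decidable (Pre_findNumOfPair array n) := by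
  unfold Pre_findNumOfPair; infer_instance
def pvWitness_findNumOfPair : List Int × Int := ([1, -2, 3, 0], 4)

def Spec_findNumOfPair (array : List Int) (n : Int) (out : Int) : Prop := out = findNumOfPair_alt array n
instance (array : List Int) (n : Int) (out : Int) : Decidable (Spec_findNumOfPair array n out) := by unfold Spec_findNumOfPair; infer_instance

-- ===== CLAIM (what is proved, stated in full; the proofs are below) =====
def Claim_equal_findNumOfPair : Prop := ∀ (array : List Int) (n : Int), Dom_findNumOfPair array n → Pre_findNumOfPair array n → Spec_findNumOfPair array n (findNumOfPair array n)

-- ===== LEMMAS AND PROOFS =====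

-- s.getD k 0 : the k-th element of the sorted array (indices here are always in range)
def pvG (s : List Int) (k : Nat) : Int := s.getD k 0

-- number of k with l ≤ k < i and s[k] + s[i] > 0
def pvCnt (s : List Int) (i l : Nat) : Nat :=
  (List.range' l (i - l)).countP (fun k => decide (0 < pvG s k + pvG s i))

-- number of pairs l ≤ k < i ≤ r with s[k] + s[i] > 0, as an Int
def pvP (s : List Int) (l r : Nat) : Int :=
  ((List.range' (l + 1) (r - l)).map (fun i => (pvCnt s i l : Int))).sum

lemma pvG_eq (s : List Int) (k : Nat) (h : k < s.length) : pvG s k = s[k] := by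
  simp [pvG, List.getD_eq_getElem?_getD, List.getElem?_eq_getElem h]

lemma pvG_mono (s : List Int) (hs : s.Pairwise (· ≤ ·)) {k i : Nat}
    (hki : k ≤ i) (hi : i < s.length) : pvG s k ≤ pvG s i := by
  rcases eq_or_lt_of_le hki with rfl | hlt
  · exact le_refl _
  · rw [pvG_eq s k (by omega), pvG_eq s i hi]
    exact List.pairwise_iff_getElem.mp hs k i (by omega) hi hlt

lemma countP_range_ge (i j : Nat) (h : j ≤ i) :
    (List.range i).countP (fun k => decide (j ≤ k)) = i - j := by
  induction i with
  | zero => simp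
  | succ i ih =>
    rcases Nat.lt_or_ge j (i+1) with hji | hji
    · rw [List.range_succ, List.countP_append, ih (by omega)]
      have h1 : List.countP (fun k => decide (j ≤ k)) [i] = 1 := by simp; omega
      omega
    · have hj : j = i + 1 := by omega
      subst hj
      rw [List.countP_eq_zero.mpr]
      · omega
      · intro a ha
        have := List.mem_range.mp ha
        simp; omega

-- A's per-index contribution equals pvCnt s i 0
lemma contribA (s : List Int) (hs : s.Pairwise (· ≤ ·)) (i : Nat) (hi : i < s.length) :
    (match PySem.List.pyGet? s (i : Int) with
     | none => (0 : Int)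
     | some ai => if ai ≤ 0 then 0 else (i : Int) - (PySem.List.bisectLeft s (-ai + 1) : Int))
    = (pvCnt s i 0 : Int) := by
  rw [PySem.List.pyGet?_ofNat s i hi]
  by_cases hpos : s[i] ≤ 0
  · simp only [hpos, if_true]
    have : pvCnt s i 0 = 0 := by
      rw [pvCnt, List.countP_eq_zero]
      intro k hk
      have hk' := List.mem_range'.mp hk
      have h1 : pvG s k ≤ pvG s i := pvG_mono s hs (by omega) hi
      have h2 : pvG s i = s[i] := pvG_eq s i hi
      simp; omega
    simp [this]
  · rw [not_le] at hpos
    simp only [if_neg (by omega : ¬ s[i] ≤ 0)]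
    obtain ⟨hlen, hlt, hge⟩ := PySem.List.bisectLeft_spec s (-s[i] + 1) hs
    set j := PySem.List.bisectLeft s (-s[i] + 1) with hj
    have hji : j ≤ i := by
      by_contra h
      rw [not_le] at h
      have := hlt i hi h
      omega
    have : pvCnt s i 0 = i - j := by
      rw [pvCnt, Nat.sub_zero, ← List.range_eq_range' , ← countP_range_ge i j hji]
      apply List.countP_congr
      intro k hk
      have hki : k < i := List.mem_range.mp hk
      have h2 : pvG s i = s[i] := pvG_eq s i hi
      have h3 : pvG s k = s[k] := pvG_eq s k (by omega)
      rcases Nat.lt_or_ge k j with hkj | hkj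
      · have := hlt k (by omega) hkj
        simp; omega
      · have := hge k (by omega) hkj
        simp; omega
    rw [this]
    push_cast [Nat.cast_sub hji]
    ring

-- the whole A-side fold is the sum of pvCnt over range N
lemma foldA (s : List Int) (hs : s.Pairwise (· ≤ ·)) (N : Nat) (hN : N ≤ s.length) :
    (PySem.List.pyRange 0 (N : Int) 1).foldl (fun count i =>
      match PySem.List.pyGet? s i with
      | none => count
      | some ai =>
        if ai ≤ 0 then count
        else count + i - (PySem.List.bisectLeft s (-ai + 1) : Int)) 0
    = ((List.range N).map (fun i => (pvCnt s i 0 : Int))).sum := by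
  have hstep : (fun (count : Int) (i : Int) =>
      match PySem.List.pyGet? s i with
      | none => count
      | some ai =>
        if ai ≤ 0 then count
        else count + i - (PySem.List.bisectLeft s (-ai + 1) : Int))
    = (fun count i => count +
      (match PySem.List.pyGet? s i with
       | none => (0 : Int)
       | some ai => if ai ≤ 0 then 0 else i - (PySem.List.bisectLeft s (-ai + 1) : Int))) := by
    funext count i
    cases PySem.List.pyGet? s i with
    | none => simp
    | some ai =>
      by_cases h : ai ≤ 0
      · simp [h]
      · simp [h]; ring
  rw [hstep, PySem.List.foldl_add, PySem.List.pyRange_zero_natCast, List.map_map, zero_add]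
  congr 1
  apply List.map_congr_left
  intro i hi
  have hiN : i < N := List.mem_range.mp hi
  simpa using contribA s hs i (by omega)

-- the two-pointer loop counts exactly the pairs inside [l, r]
lemma twoPtr_spec (s : List Int) (hs : s.Pairwise (· ≤ ·)) :
    ∀ (fuel : Nat) (l r : Nat), r < s.length → fuel = r - l →
    ∀ count, twoPtrLoop s fuel (l : Int) (r : Int) count = count + pvP s l r := by
  intro fuel
  induction fuel with
  | zero =>
    intro l r hr hf count
    have : r - l = 0 := hf.symm
    simp [twoPtrLoop, pvP, this]
  | succ fuel ih =>
    intro l r hr hf count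
    have hlr : l < r := by omega
    have hl : l < s.length := by omega
    rw [twoPtrLoop, PySem.List.pyGet?_ofNat s l hl, PySem.List.pyGet?_ofNat s r hr]
    have hGl : pvG s l = s[l] := pvG_eq s l hl
    have hGr : pvG s r = s[r] := pvG_eq s r hr
    by_cases hc : 0 < s[l] + s[r]
    · simp only [hc, if_true]
      have hr1 : ((r : Int) - 1) = ((r - 1 : Nat) : Int) := by omega
      rw [hr1, ih l (r-1) (by omega) (by omega)]
      -- pvP s l r = (r - l) + pvP s l (r-1)
      have hsplit : List.range' (l+1) (r - l) = List.range' (l+1) (r - 1 - l) ++ [r] := by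
        have : r - l = (r - 1 - l) + 1 := by omega
        rw [this, List.range'_concat]
        congr 2
        omega
      have hcnt : pvCnt s r l = r - l := by
        rw [pvCnt, List.countP_eq_length.mpr, List.length_range']
        intro k hk
        have hk' := List.mem_range'.mp hk
        have h1 : pvG s l ≤ pvG s k := pvG_mono s hs (by omega) (by omega)
        simp; omega
      have hP : pvP s l r = ((r : Int) - l) + pvP s l (r-1) := by
        rw [pvP, hsplit, List.map_append, List.sum_append, List.map_singleton,
          List.sum_singleton, hcnt, pvP]
        push_cast [Nat.cast_sub (le_of_lt hlr)]
        ring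
      rw [hP]; ring
    · simp only [hc, if_false]
      have hl1 : ((l : Int) + 1) = ((l + 1 : Nat) : Int) := by omega
      rw [hl1, ih (l+1) r hr (by omega)]
      -- pvP s l r = pvP s (l+1) r
      have hle : ∀ i : Nat, i ≤ r → pvG s l + pvG s i ≤ 0 := by
        intro i hir
        have h1 : pvG s i ≤ pvG s r := pvG_mono s hs hir hr
        omega
      have hcons : List.range' (l+1) (r - l) = (l+1) :: List.range' (l+2) (r - 1 - l) := by
        have : r - l = (r - 1 - l) + 1 := by omega
        rw [this, List.range'_succ]
      have hcnt0 : pvCnt s (l+1) l = 0 := by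
        rw [pvCnt, List.countP_eq_zero]
        intro k hk
        have hk' := List.mem_range'.mp hk
        have hkl : k = l := by omega
        subst hkl
        have := hle (k+1) (by omega)
        simp; omega
      have hP : pvP s l r = pvP s (l+1) r := by
        rw [pvP, pvP, hcons]
        simp only [List.map_cons, List.sum_cons, hcnt0, Nat.cast_zero, zero_add]
        have harg : r - (l+1) = r - 1 - l := by omega
        rw [harg]
        congr 1
        apply List.map_congr_left
        intro i hi
        have hi' := List.mem_range'.mp hi
        -- pvCnt s i l = pvCnt s i (l+1) : the k = l term contributes 0
        have : List.range' l (i - l) = l :: List.range' (l+1) (i - (l+1)) := by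
          have : i - l = (i - (l+1)) + 1 := by omega
          rw [this, List.range'_succ]
        rw [pvCnt, pvCnt, this, List.countP_cons]
        have := hle i (by omega)
        simp; omega
      rw [hP]

-- ===== VERDICT (by name: the statement is the Claim_ definition above) =====
theorem findNumOfPair_spec : Claim_equal_findNumOfPair := by
  intro array n _hdom hpre
  unfold Spec_findNumOfPair findNumOfPair findNumOfPair_alt
  set s := PySem.List.sorted array (fun x => x) false with hsdef
  have hs : s.Pairwise (· ≤ ·) := PySem.List.sorted_pairwise array (fun x => x)
  have hslen : s.length = array.length := (PySem.List.sorted_perm array (fun x => x) false).length_eq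
  change _ = twoPtrLoop s (n - 1).toNat 0 (n - 1) 0
  rcases Decidable.em (n ≤ 0) with hn0 | hn0
  · rw [PySem.List.pyRange_one_eq_nil hn0]
    have : (n - 1).toNat = 0 := by omega
    simp [this, twoPtrLoop]
  · set N := n.toNat with hNdef
    have hnN : n = (N : Int) := by omega
    have hNlen : N ≤ s.length := by
      rw [hslen]
      have := hpre
      unfold Pre_findNumOfPair at this
      omega
    have hN1 : 1 ≤ N := by omega
    rw [hnN, foldA s hs N hNlen]
    have h1 : ((N : Int) - 1).toNat = N - 1 := by omega
    have h2 : ((N : Int) - 1) = ((N - 1 : Nat) : Int) := by omega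
    have key := twoPtr_spec s hs (N-1) 0 (N-1) (by omega) (by omega) 0
    rw [Nat.cast_zero] at key
    rw [h1, h2, key, zero_add]
    -- ∑_{i < N} pvCnt s i 0 = pvP s 0 (N-1)
    have hrange : List.range N = 0 :: List.range' 1 (N - 1) := by
      rw [List.range_eq_range']
      have : N = (N - 1) + 1 := by omega
      rw [this, List.range'_succ]
      simp
    rw [hrange]
    simp [pvP, pvCnt]
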